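-- pv_equiv track=rewrite | github.com/pungys97/advent_of_code_2024 | script_11.py | clean_fences_needed
-- ===== SOURCE A (Python) =====
-- UP = 0
--
-- RIGHT = 1
--
-- DOWN = 2
--
-- LEFT = 3
--
-- def clean_fences_needed(fences_needed):
--     cleaned_fences = set()
--     for fence in fences_needed:
--         (row_idx, col_idx), heading = fence
--         # look left and same heading not in fences_needed then add it
--         if (heading == UP or heading == DOWN) and ((row_idx, col_idx - 1), heading) not in fences_needed:
--             cleaned_fences.add(fence)
--         elif (heading == LEFT or heading == RIGHT) and ((row_idx - 1, col_idx), heading) not in fences_needed: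
--             cleaned_fences.add(fence)
--     return cleaned_fences
-- ===== SOURCE B (Python) =====
-- UP = 0
--
-- RIGHT = 1
--
-- DOWN = 2
--
-- LEFT = 3
--
--
-- def clean_fences_needed(fences_needed):
--     # Group fences by their line: horizontal fences (UP/DOWN) by (row, heading),
--     # vertical fences (LEFT/RIGHT) by (col, heading).  A fence survives iff the
--     # coordinate one below it along its line is absent, which a single scan of the
--     # sorted coordinates of each line detects by comparing neighbours.
--     groups = {}
--     for (row_idx, col_idx), heading in fences_needed:
--         if heading == UP or heading == DOWN:
--             key, coord = (row_idx, heading), col_idx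
--         elif heading == LEFT or heading == RIGHT:
--             key, coord = (col_idx, heading), row_idx
--         else:
--             continue
--         groups.setdefault(key, set()).add(coord)
--     survivors = set()
--     for (line, heading), coords in groups.items():
--         prev = None
--         for coord in sorted(coords):
--             if prev != coord - 1:
--                 if heading == UP or heading == DOWN:
--                     survivors.add(((line, coord), heading))
--                 else:
--                     survivors.add(((coord, line), heading))
--             prev = coord
--     cleaned_fences = set()
--     for fence in fences_needed:
--         if fence in survivors:
--             cleaned_fences.add(fence)
--     return cleaned_fences
-- ===== Notes on version B (the rewrite author's own statement) =====
-- stated objective: alternative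
-- what changed: Replaces A's per-fence 'neighbour not in list' membership scan by grouping fences into lines in a dict, sorting each line's coordinates and emitting run starts found by comparing adjacent sorted coordinates.
import Mathlib
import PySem

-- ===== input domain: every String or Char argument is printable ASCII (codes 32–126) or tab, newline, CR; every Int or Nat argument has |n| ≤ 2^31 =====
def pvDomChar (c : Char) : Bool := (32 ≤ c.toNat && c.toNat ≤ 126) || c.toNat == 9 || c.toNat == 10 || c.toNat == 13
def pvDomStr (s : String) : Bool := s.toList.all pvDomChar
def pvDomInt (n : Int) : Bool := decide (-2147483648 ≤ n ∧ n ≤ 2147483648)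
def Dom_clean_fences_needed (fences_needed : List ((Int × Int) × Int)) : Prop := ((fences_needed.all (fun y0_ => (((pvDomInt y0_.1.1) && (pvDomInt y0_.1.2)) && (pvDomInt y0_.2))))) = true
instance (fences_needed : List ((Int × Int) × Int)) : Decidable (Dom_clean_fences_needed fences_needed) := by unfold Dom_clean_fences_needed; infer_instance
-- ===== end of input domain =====

-- B replaces A's per-fence 'neighbour not in list' scan by a different algorithm: group each
-- fence line in a dict and detect run starts by one scan of the line's sorted coordinates.

-- ===== PORT A =====
-- literal transliteration of A: for each fence, add it to the result set iff the
-- neighbouring fence (left for UP/DOWN, above for LEFT/RIGHT) is absent from the list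
def clean_fences_needed (fences_needed : List ((Int × Int) × Int)) : List ((Int × Int) × Int) :=
  fences_needed.foldl (fun cleaned_fences fence =>
    if (fence.2 = 0 ∨ fence.2 = 2) ∧ ((fence.1.1, fence.1.2 - 1), fence.2) ∉ fences_needed then
      PySem.Set.add cleaned_fences fence
    else if (fence.2 = 1 ∨ fence.2 = 3) ∧ ((fence.1.1 - 1, fence.1.2), fence.2) ∉ fences_needed then
      PySem.Set.add cleaned_fences fence
    else cleaned_fences) []

-- ===== PORT B =====
-- B-side helpers (the three loop bodies of Source B)
-- grouping loop body: groups.setdefault(key, set()).add(coord)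
def pvGroupStep (d : PySem.Dict (Int × Int) (PySem.Set Int)) (f : (Int × Int) × Int) :
    PySem.Dict (Int × Int) (PySem.Set Int) :=
  if f.2 = 0 ∨ f.2 = 2 then d.modify (f.1.1, f.2) [] (fun s => PySem.Set.add s f.1.2)
  else if f.2 = 1 ∨ f.2 = 3 then d.modify (f.1.2, f.2) [] (fun s => PySem.Set.add s f.1.1)
  else d

-- fence tuple rebuilt from its line, heading and perpendicular coordinate
def pvMk (line h coord : Int) : (Int × Int) × Int :=
  if h = 0 ∨ h = 2 then ((line, coord), h) else ((coord, line), h)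

-- inner scan body: emit the fence iff prev != coord - 1, then prev = coord
def pvScanStep (line h : Int) (st : PySem.Set ((Int × Int) × Int) × Option Int) (coord : Int) :
    PySem.Set ((Int × Int) × Int) × Option Int :=
  (if st.2 ≠ some (coord - 1) then PySem.Set.add st.1 (pvMk line h coord) else st.1, some coord)

-- per-line loop body: scan the sorted coordinates of the line
def pvLineStep (sv : PySem.Set ((Int × Int) × Int)) (p : (Int × Int) × PySem.Set Int) :
    PySem.Set ((Int × Int) × Int) :=
  ((PySem.List.sorted p.2 (fun x => x) false).foldl (pvScanStep p.1.1 p.1.2) (sv, none)).1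

def clean_fences_needed_alt (fences_needed : List ((Int × Int) × Int)) : List ((Int × Int) × Int) :=
  let groups := fences_needed.foldl pvGroupStep PySem.Dict.empty
  let survivors := groups.items.foldl pvLineStep []
  fences_needed.foldl (fun cleaned_fences fence =>
    if PySem.Set.contains survivors fence then PySem.Set.add cleaned_fences fence
    else cleaned_fences) []

-- ===== PRECONDITION & SPEC =====
def Spec_clean_fences_needed (fences_needed : List ((Int × Int) × Int)) (out : List ((Int × Int) × Int)) : Prop := out = clean_fences_needed_alt fences_needed
instance (fences_needed : List ((Int × Int) × Int)) (out : List ((Int × Int) × Int)) : Decidable (Spec_clean_fences_needed fences_needed out) := by unfold Spec_clean_fences_needed; infer_instance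

-- ===== CLAIM (what is proved, stated in full; the proofs are below) =====
def Claim_equal_clean_fences_needed : Prop := ∀ (fences_needed : List ((Int × Int) × Int)), Dom_clean_fences_needed fences_needed → Spec_clean_fences_needed fences_needed (clean_fences_needed fences_needed)

-- ===== LEMMAS AND PROOFS =====

-- A adds a fence iff this (flattened if/elif) condition holds
lemma pvA_eq (fences : List ((Int × Int) × Int)) :
    clean_fences_needed fences = fences.foldl (fun acc f =>
      if ((f.2 = 0 ∨ f.2 = 2) ∧ ((f.1.1, f.1.2 - 1), f.2) ∉ fences) ∨
         ((f.2 = 1 ∨ f.2 = 3) ∧ ((f.1.1 - 1, f.1.2), f.2) ∉ fences) then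
        PySem.Set.add acc f else acc) [] := by
  unfold clean_fences_needed
  apply PySem.List.foldl_congr_mem
  intro acc f _
  split_ifs <;> tauto

-- membership in a group of the dict built by the grouping loop
lemma pvMem_groupFold (fences : List ((Int × Int) × Int))
    (d : PySem.Dict (Int × Int) (PySem.Set Int)) (a h x : Int) :
    x ∈ (fences.foldl pvGroupStep d).getD (a, h) [] ↔
      x ∈ d.getD (a, h) [] ∨
      ((h = 0 ∨ h = 2) ∧ ((a, x), h) ∈ fences) ∨
      ((h = 1 ∨ h = 3) ∧ ((x, a), h) ∈ fences) := by
  induction fences generalizing d with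
  | nil => simp
  | cons g t ih =>
    obtain ⟨⟨gr, gc⟩, gh⟩ := g
    simp only [List.foldl_cons]
    rw [ih]
    have hstep : x ∈ (pvGroupStep d ((gr, gc), gh)).getD (a, h) [] ↔
        x ∈ d.getD (a, h) [] ∨
        ((h = 0 ∨ h = 2) ∧ ((a, x), h) = ((gr, gc), gh)) ∨
        ((h = 1 ∨ h = 3) ∧ ((x, a), h) = ((gr, gc), gh)) := by
      unfold pvGroupStep
      dsimp only
      simp only [Prod.mk.injEq]
      split_ifs with h1 h2
      · rw [PySem.Dict.getD_modify]
        simp only [Prod.mk.injEq]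
        split_ifs with hk
        · obtain ⟨rfl, rfl⟩ := hk
          rw [PySem.Set.mem_add]
          constructor
          · rintro (hm | rfl)
            · exact Or.inl hm
            · refine Or.inr (Or.inl ⟨h1, ⟨?_, ?_⟩, ?_⟩) <;> omega
          · rintro (hm | ⟨hh, ⟨ha, hx⟩, hhd⟩ | ⟨hh, ⟨hx, ha⟩, hhd⟩)
            · exact Or.inl hm
            · exact Or.inr (by omega)
            · exact Or.inr (by omega)
        · constructor
          · exact fun hm => Or.inl hm
          · rintro (hm | ⟨hh, ⟨ha, hx⟩, hhd⟩ | ⟨hh, ⟨hx, ha⟩, hhd⟩)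
            · exact hm
            · exact absurd ⟨ha, hhd⟩ hk
            · exfalso; omega
      · rw [PySem.Dict.getD_modify]
        simp only [Prod.mk.injEq]
        split_ifs with hk
        · obtain ⟨rfl, rfl⟩ := hk
          rw [PySem.Set.mem_add]
          constructor
          · rintro (hm | rfl)
            · exact Or.inl hm
            · refine Or.inr (Or.inr ⟨h2, ⟨?_, ?_⟩, ?_⟩) <;> omega
          · rintro (hm | ⟨hh, ⟨ha, hx⟩, hhd⟩ | ⟨hh, ⟨hx, ha⟩, hhd⟩)
            · exact Or.inl hm
            · exact Or.inr (by omega)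
            · exact Or.inr (by omega)
        · constructor
          · exact fun hm => Or.inl hm
          · rintro (hm | ⟨hh, ⟨ha, hx⟩, hhd⟩ | ⟨hh, ⟨hx, ha⟩, hhd⟩)
            · exact hm
            · exfalso; omega
            · exact absurd ⟨ha, hhd⟩ hk
      · constructor
        · exact fun hm => Or.inl hm
        · rintro (hm | ⟨hh, ⟨ha, hx⟩, hhd⟩ | ⟨hh, ⟨hx, ha⟩, hhd⟩)
          · exact hm
          · exfalso; omega
          · exfalso; omega
    rw [hstep]
    simp only [List.mem_cons]
    constructor
    · rintro ((hm | ⟨hh, he⟩ | ⟨hh, he⟩) | ⟨hh, hm⟩ | ⟨hh, hm⟩)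
      · exact Or.inl hm
      · exact Or.inr (Or.inl ⟨hh, Or.inl he⟩)
      · exact Or.inr (Or.inr ⟨hh, Or.inl he⟩)
      · exact Or.inr (Or.inl ⟨hh, Or.inr hm⟩)
      · exact Or.inr (Or.inr ⟨hh, Or.inr hm⟩)
    · rintro (hm | ⟨hh, he | hm⟩ | ⟨hh, he | hm⟩)
      · exact Or.inl (Or.inl hm)
      · exact Or.inl (Or.inr (Or.inl ⟨hh, he⟩))
      · exact Or.inr (Or.inl ⟨hh, hm⟩)
      · exact Or.inl (Or.inr (Or.inr ⟨hh, he⟩))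
      · exact Or.inr (Or.inr ⟨hh, hm⟩)

-- keys of the built dict stay Nodup
lemma pvNodup_keys_groupFold (fences : List ((Int × Int) × Int))
    (d : PySem.Dict (Int × Int) (PySem.Set Int)) (hd : d.keys.Nodup) :
    (fences.foldl pvGroupStep d).keys.Nodup := by
  induction fences generalizing d with
  | nil => exact hd
  | cons g t ih =>
    simp only [List.foldl_cons]
    apply ih
    unfold pvGroupStep
    split_ifs
    · rw [PySem.Dict.keys_modify]; exact PySem.Dict.nodup_keys_insert _ _ _ hd
    · rw [PySem.Dict.keys_modify]; exact PySem.Dict.nodup_keys_insert _ _ _ hd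
    · exact hd

-- every key of the built dict has heading 0/1/2/3
lemma pvKeys_heading_groupFold (fences : List ((Int × Int) × Int))
    (d : PySem.Dict (Int × Int) (PySem.Set Int))
    (hd : ∀ k ∈ d.keys, k.2 = 0 ∨ k.2 = 1 ∨ k.2 = 2 ∨ k.2 = 3) :
    ∀ k ∈ (fences.foldl pvGroupStep d).keys, k.2 = 0 ∨ k.2 = 1 ∨ k.2 = 2 ∨ k.2 = 3 := by
  induction fences generalizing d with
  | nil => exact hd
  | cons g t ih =>
    simp only [List.foldl_cons]
    apply ih
    intro k hk
    unfold pvGroupStep at hk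
    split_ifs at hk with h1 h2
    · rw [PySem.Dict.keys_modify] at hk
      rcases (PySem.Dict.mem_keys_insert _ _ _ _).1 hk with rfl | hk
      · simpa using (by omega : g.2 = 0 ∨ g.2 = 1 ∨ g.2 = 2 ∨ g.2 = 3)
      · exact hd k hk
    · rw [PySem.Dict.keys_modify] at hk
      rcases (PySem.Dict.mem_keys_insert _ _ _ _).1 hk with rfl | hk
      · simpa using (by omega : g.2 = 0 ∨ g.2 = 1 ∨ g.2 = 2 ∨ g.2 = 3)
      · exact hd k hk
    · exact hd k hk

-- every group value of the built dict is a Nodup list (a genuine set)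
lemma pvNodup_getD_groupFold (fences : List ((Int × Int) × Int))
    (d : PySem.Dict (Int × Int) (PySem.Set Int))
    (hd : ∀ k, (d.getD k []).Nodup) :
    ∀ k, ((fences.foldl pvGroupStep d).getD k []).Nodup := by
  induction fences generalizing d with
  | nil => exact hd
  | cons g t ih =>
    simp only [List.foldl_cons]
    apply ih
    intro k
    unfold pvGroupStep
    split_ifs
    · rw [PySem.Dict.getD_modify]
      split_ifs
      · exact PySem.Set.nodup_add _ _ (hd _)
      · exact hd k
    · rw [PySem.Dict.getD_modify]
      split_ifs
      · exact PySem.Set.nodup_add _ _ (hd _)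
      · exact hd k
    · exact hd k

-- the inner scan over a strictly increasing list emits exactly the run starts
lemma pvMem_scanFold (line h : Int) (l : List Int)
    (sv : PySem.Set ((Int × Int) × Int)) (p : Option Int)
    (hl : l.Pairwise (· < ·)) (hp : ∀ v, p = some v → ∀ y ∈ l, v < y)
    (g : (Int × Int) × Int) :
    g ∈ (l.foldl (pvScanStep line h) (sv, p)).1 ↔
      g ∈ sv ∨ ∃ x, x ∈ l ∧ (x - 1) ∉ l ∧ p ≠ some (x - 1) ∧ g = pvMk line h x := by
  induction l generalizing sv p with
  | nil => simp
  | cons x t ih =>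
    simp only [List.foldl_cons]
    have hxlt : ∀ y ∈ t, x < y := fun y hy => (List.pairwise_cons.1 hl).1 y hy
    have hstep : pvScanStep line h (sv, p) x =
        (if p ≠ some (x - 1) then PySem.Set.add sv (pvMk line h x) else sv, some x) := rfl
    rw [hstep, ih _ _ (List.pairwise_cons.1 hl).2
      (by intro v hv y hy; have hxv := Option.some.inj hv; subst hxv; exact hxlt y hy)]
    have hx1t : (x - 1) ∉ (x :: t) := by
      simp only [List.mem_cons, not_or]
      exact ⟨by omega, fun hm => absurd (hxlt _ hm) (by omega)⟩
    constructor
    · rintro (hm | ⟨y, hyt, hy1, hyx, rfl⟩)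
      · split_ifs at hm with hpx
        · rcases (PySem.Set.mem_add _ _ _).1 hm with hm | rfl
          · exact Or.inl hm
          · exact Or.inr ⟨x, List.mem_cons_self .., hx1t, hpx, rfl⟩
        · exact Or.inl hm
      · refine Or.inr ⟨y, List.mem_cons_of_mem _ hyt, ?_, ?_, rfl⟩
        · simp only [List.mem_cons, not_or]
          exact ⟨fun he => hyx (by rw [he]), hy1⟩
        · rintro he
          have h1 := hxlt y hyt
          have hv := hp _ he x (List.mem_cons_self ..)
          omega
    · rintro (hm | ⟨y, hyl, hy1, hyp, rfl⟩)
      · refine Or.inl ?_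
        split_ifs with hpx
        · exact (PySem.Set.mem_add _ _ _).2 (Or.inl hm)
        · exact hm
      · rcases List.mem_cons.1 hyl with rfl | hyt
        · refine Or.inl ?_
          rw [if_pos hyp]
          exact (PySem.Set.mem_add _ _ _).2 (Or.inr rfl)
        · refine Or.inr ⟨y, hyt, ?_, ?_, rfl⟩
          · exact fun hm => hy1 (List.mem_cons_of_mem _ hm)
          · intro he
            injection he with he'
            exact hy1 (he' ▸ List.mem_cons_self ..)

-- membership in the survivors set built by the per-line loop
lemma pvMem_lineFold (items : List ((Int × Int) × PySem.Set Int))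
    (sv : PySem.Set ((Int × Int) × Int))
    (hnd : ∀ p ∈ items, (p.2 : List Int).Nodup) (g : (Int × Int) × Int) :
    g ∈ items.foldl pvLineStep sv ↔
      g ∈ sv ∨ ∃ p ∈ items, ∃ x, x ∈ (p.2 : List Int) ∧ (x - 1) ∉ (p.2 : List Int) ∧
        g = pvMk p.1.1 p.1.2 x := by
  induction items generalizing sv with
  | nil => simp
  | cons q t ih =>
    simp only [List.foldl_cons]
    have hq : (q.2 : List Int).Nodup := hnd q (List.mem_cons_self ..)
    have hsorted : (PySem.List.sorted (q.2 : List Int) (fun x => x) false).Pairwise (· < ·) := by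
      have hle := PySem.List.sorted_pairwise (q.2 : List Int) (fun x => x)
      have hnd' : (PySem.List.sorted (q.2 : List Int) (fun x => x) false).Nodup :=
        (PySem.List.sorted_perm (q.2 : List Int) (fun x => x) false).nodup_iff.2 hq
      exact (hle.and hnd').imp (fun hab => lt_of_le_of_ne hab.1 hab.2)
    rw [ih _ (fun p hp => hnd p (List.mem_cons_of_mem _ hp))]
    have hline : g ∈ pvLineStep sv q ↔
        g ∈ sv ∨ ∃ x, x ∈ (q.2 : List Int) ∧ (x - 1) ∉ (q.2 : List Int) ∧
          g = pvMk q.1.1 q.1.2 x := by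
      unfold pvLineStep
      rw [pvMem_scanFold _ _ _ _ _ hsorted (by rintro v h; cases h) g]
      simp only [PySem.List.mem_sorted]
      constructor
      · rintro (hm | ⟨x, h1, h2, _, h4⟩)
        · exact Or.inl hm
        · exact Or.inr ⟨x, h1, h2, h4⟩
      · rintro (hm | ⟨x, h1, h2, h4⟩)
        · exact Or.inl hm
        · exact Or.inr ⟨x, h1, h2, by simp, h4⟩
    rw [hline]
    simp only [List.mem_cons]
    constructor
    · rintro (( hm | ⟨x, h1, h2, h4⟩) | ⟨p, hp, hx⟩)
      · exact Or.inl hm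
      · exact Or.inr ⟨q, Or.inl rfl, x, h1, h2, h4⟩
      · exact Or.inr ⟨p, Or.inr hp, hx⟩
    · rintro (hm | ⟨p, (rfl | hp), hx⟩)
      · exact Or.inl (Or.inl hm)
      · exact Or.inl (Or.inr hx)
      · exact Or.inr ⟨p, hp, hx⟩

-- the survivors set holds exactly A's condition, for fences that occur in the input
lemma pvMem_survivors (fences : List ((Int × Int) × Int)) (f : (Int × Int) × Int)
    (hf : f ∈ fences) :
    f ∈ (fences.foldl pvGroupStep PySem.Dict.empty).items.foldl pvLineStep [] ↔
      ((f.2 = 0 ∨ f.2 = 2) ∧ ((f.1.1, f.1.2 - 1), f.2) ∉ fences) ∨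
      ((f.2 = 1 ∨ f.2 = 3) ∧ ((f.1.1 - 1, f.1.2), f.2) ∉ fences) := by
  set G := fences.foldl pvGroupStep PySem.Dict.empty with hG
  have hkeys : G.keys.Nodup := pvNodup_keys_groupFold fences _ (by simp)
  have hvals : ∀ k, (G.getD k []).Nodup :=
    pvNodup_getD_groupFold fences _ (by intro k; simp [PySem.Dict.getD_empty])
  have hhead : ∀ k ∈ G.keys, k.2 = 0 ∨ k.2 = 1 ∨ k.2 = 2 ∨ k.2 = 3 :=
    pvKeys_heading_groupFold fences _ (by simp)
  have hitems : ∀ p ∈ G.items, (p.2 : List Int).Nodup := by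
    intro p hp
    have := PySem.Dict.getD_of_mem_items G (k := p.1) (v := p.2) (by exact hp) hkeys []
    rw [← this]; exact hvals p.1
  rw [pvMem_lineFold _ _ hitems]
  simp only [List.not_mem_nil, false_or]
  have hmemG : ∀ a h x, x ∈ G.getD (a, h) [] ↔
      ((h = 0 ∨ h = 2) ∧ ((a, x), h) ∈ fences) ∨
      ((h = 1 ∨ h = 3) ∧ ((x, a), h) ∈ fences) := by
    intro a h x
    rw [hG, pvMem_groupFold]
    simp [PySem.Dict.getD_empty]
  constructor
  · rintro ⟨⟨⟨line, h'⟩, coords⟩, hp, x, hx, hx1, hmk⟩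
    have hval : G.getD (line, h') [] = coords :=
      PySem.Dict.getD_of_mem_items G (k := (line, h')) (v := coords) (by exact hp) hkeys []
    have hh := hhead (line, h') (PySem.Dict.mem_keys_of_mem_items G hp)
    simp only at hh hmk
    unfold pvMk at hmk
    by_cases hcase : h' = 0 ∨ h' = 2
    · rw [if_pos hcase] at hmk
      subst hmk
      simp only
      rw [← hval] at hx hx1
      rcases (hmemG line h' x).1 hx with ⟨_, hmem⟩ | ⟨hbad, _⟩
      · refine Or.inl ⟨hcase, fun hnb => ?_⟩
        exact hx1 ((hmemG line h' (x - 1)).2 (Or.inl ⟨hcase, hnb⟩))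
      · omega
    · have hcase' : h' = 1 ∨ h' = 3 := by omega
      rw [if_neg hcase] at hmk
      subst hmk
      simp only
      rw [hval.symm] at hx hx1
      rcases (hmemG line h' x).1 hx with ⟨hbad, _⟩ | ⟨_, hmem⟩
      · omega
      · refine Or.inr ⟨hcase', fun hnb => ?_⟩
        exact hx1 ((hmemG line h' (x - 1)).2 (Or.inr ⟨hcase', hnb⟩))
  · rintro (⟨hcase, hnb⟩ | ⟨hcase, hnb⟩)
    · -- horizontal fence: group key (row, heading), coordinate = column
      have hx : f.1.2 ∈ G.getD (f.1.1, f.2) [] :=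
        (hmemG f.1.1 f.2 f.1.2).2 (Or.inl ⟨hcase, by rwa [show ((f.1.1, f.1.2), f.2) = f by rfl]⟩)
      have hcon : G.contains (f.1.1, f.2) = true := by
        by_contra hc
        rw [PySem.Dict.getD_of_not_contains G _ (by simpa using hc)] at hx
        exact absurd hx (List.not_mem_nil)
      obtain ⟨v, hv⟩ : ∃ v, G.get? (f.1.1, f.2) = some v := by
        rcases hq : G.get? (f.1.1, f.2) with _ | v
        · rw [(PySem.Dict.get?_eq_none_iff_contains G _).1 hq] at hcon; cases hcon
        · exact ⟨v, rfl⟩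
      have hvD : G.getD (f.1.1, f.2) [] = v := PySem.Dict.getD_of_get?_eq_some G [] hv
      refine ⟨((f.1.1, f.2), v), PySem.Dict.mem_items_of_get?_eq_some G hv, f.1.2, ?_, ?_, ?_⟩
      · rw [← hvD]; exact hx
      · rw [← hvD]
        intro hm
        rcases (hmemG f.1.1 f.2 (f.1.2 - 1)).1 hm with ⟨_, hmem⟩ | ⟨hbad, _⟩
        · exact hnb hmem
        · omega
      · unfold pvMk; rw [if_pos hcase]
    · -- vertical fence: group key (col, heading), coordinate = row
      have hx : f.1.1 ∈ G.getD (f.1.2, f.2) [] :=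
        (hmemG f.1.2 f.2 f.1.1).2 (Or.inr ⟨hcase, by rwa [show ((f.1.1, f.1.2), f.2) = f by rfl]⟩)
      have hcon : G.contains (f.1.2, f.2) = true := by
        by_contra hc
        rw [PySem.Dict.getD_of_not_contains G _ (by simpa using hc)] at hx
        exact absurd hx (List.not_mem_nil)
      obtain ⟨v, hv⟩ : ∃ v, G.get? (f.1.2, f.2) = some v := by
        rcases hq : G.get? (f.1.2, f.2) with _ | v
        · rw [(PySem.Dict.get?_eq_none_iff_contains G _).1 hq] at hcon; cases hcon
        · exact ⟨v, rfl⟩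
      have hvD : G.getD (f.1.2, f.2) [] = v := PySem.Dict.getD_of_get?_eq_some G [] hv
      refine ⟨((f.1.2, f.2), v), PySem.Dict.mem_items_of_get?_eq_some G hv, f.1.1, ?_, ?_, ?_⟩
      · rw [← hvD]; exact hx
      · rw [← hvD]
        intro hm
        rcases (hmemG f.1.2 f.2 (f.1.1 - 1)).1 hm with ⟨hbad, _⟩ | ⟨_, hmem⟩
        · omega
        · exact hnb hmem
      · unfold pvMk
        rw [if_neg (show ¬(f.2 = 0 ∨ f.2 = 2) by omega)]

-- ===== VERDICT (by name: the statement is the Claim_ definition above) =====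
theorem clean_fences_needed_spec : Claim_equal_clean_fences_needed := by
  intro fences _
  unfold Spec_clean_fences_needed clean_fences_needed_alt
  rw [pvA_eq]
  apply PySem.List.foldl_congr_mem
  intro acc f hf
  have hs := pvMem_survivors fences f hf
  by_cases hc : ((f.2 = 0 ∨ f.2 = 2) ∧ ((f.1.1, f.1.2 - 1), f.2) ∉ fences) ∨
      ((f.2 = 1 ∨ f.2 = 3) ∧ ((f.1.1 - 1, f.1.2), f.2) ∉ fences)
  · rw [if_pos hc, if_pos (by simpa [PySem.Set.contains_iff] using hs.2 hc)]
  · rw [if_neg hc, if_neg (by simpa [PySem.Set.contains_iff] using fun hm => hc (hs.1 hm))]
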